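-- pv_equiv track=rewrite | github.com/JonathanGun/Project-Euler | 051 - 075/Prob54.py | samenum
-- ===== SOURCE A (Python) =====
-- def getnums(cards):
--     cardnum = []
--     for card in cards:
--         card = card[0]
--         if card == '2':
--             cardnum.append(2)
--         if card == '3':
--             cardnum.append(3)
--         if card == '4':
--             cardnum.append(4)
--         if card == '5':
--             cardnum.append(5)
--         if card == '6':
--             cardnum.append(6)
--         if card == '7':
--             cardnum.append(7)
--         if card == '8':
--             cardnum.append(8)
--         if card == '9':
--             cardnum.append(9)
--         if card == 'T':
--             cardnum.append(10)
--         if card == 'J':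
--             cardnum.append(11)
--         if card == 'Q':
--             cardnum.append(12)
--         if card == 'K':
--             cardnum.append(13)
--         if card == 'A':
--             cardnum.append(14)
--     return sorted(cardnum)
--
-- def samenum(cards):
--     cards = getnums(cards)
--     num = cards[0]
--     ans = []
--     cnt = 0
--     for card in cards:
--         if card == num:
--             cnt += 1
--         else:
--             ans.append(cnt)
--             cnt = 1
--             num = card
--     ans.append(cnt)
--     return sorted(ans)[::-1]
-- ===== SOURCE B (Python) =====
-- _RANK = {'2': 2, '3': 3, '4': 4, '5': 5, '6': 6, '7': 7, '8': 8,
--          '9': 9, 'T': 10, 'J': 11, 'Q': 12, 'K': 13, 'A': 14}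
--
--
-- def samenum(cards):
--     counts = {}
--     for card in cards:
--         r = _RANK.get(card[0])
--         if r is not None:
--             counts[r] = counts.get(r, 0) + 1
--     return sorted(counts.values(), reverse=True)
-- ===== Notes on version B (the rewrite author's own statement) =====
-- stated objective: idiomatic
-- what changed: A maps cards to ranks via thirteen if-appends, sorts the rank list, run-length-encodes it with a num/cnt loop, sorts the run lengths and reverses; B looks each first character up in a rank dict and tallies counts in a dictionary in one pass, returning its values sorted descending.
-- outside the precondition, e.g. on samenum([]): A raises IndexError, B returns []
-- crash fix: On hands whose cards are all nonempty strings but none starts with a rank character (2-9, T, J, Q, K, A), A raises IndexError (cards[0] on the empty rank list) while B returns []. — e.g. on samenum(["XY", "zz"]): A raises IndexError, B returns []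
import Mathlib
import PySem

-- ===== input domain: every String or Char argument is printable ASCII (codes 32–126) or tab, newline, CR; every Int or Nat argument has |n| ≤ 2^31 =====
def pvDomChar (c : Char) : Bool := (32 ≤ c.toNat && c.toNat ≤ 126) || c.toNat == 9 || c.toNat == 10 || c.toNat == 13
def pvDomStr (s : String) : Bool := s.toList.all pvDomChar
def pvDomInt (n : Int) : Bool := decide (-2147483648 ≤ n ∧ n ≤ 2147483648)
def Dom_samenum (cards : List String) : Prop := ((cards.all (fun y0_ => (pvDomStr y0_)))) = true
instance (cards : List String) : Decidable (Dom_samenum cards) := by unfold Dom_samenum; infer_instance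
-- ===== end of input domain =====

-- B replaces A's sort + run-length pass by a single-pass dict tally whose values are sorted descending (alternative algorithm, same result).

-- ===== PORT A =====
-- loop body of getnums: card = card[0]; thirteen independent 'if's appending a rank.
-- On an empty card Python raises IndexError at card[0] (PySem.Str.pyGet? = none): excluded by Pre_, the port skips the card there.
def getnumsBody (cardnum : List Int) (card : String) : List Int :=
  match PySem.Str.pyGet? card 0 with
  | none => cardnum      -- IndexError in Python; outside Pre_samenum
  | some c =>
    let cardnum := if c = '2' then cardnum ++ [(2 : Int)] else cardnum
    let cardnum := if c = '3' then cardnum ++ [3] else cardnum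
    let cardnum := if c = '4' then cardnum ++ [4] else cardnum
    let cardnum := if c = '5' then cardnum ++ [5] else cardnum
    let cardnum := if c = '6' then cardnum ++ [6] else cardnum
    let cardnum := if c = '7' then cardnum ++ [7] else cardnum
    let cardnum := if c = '8' then cardnum ++ [8] else cardnum
    let cardnum := if c = '9' then cardnum ++ [9] else cardnum
    let cardnum := if c = 'T' then cardnum ++ [10] else cardnum
    let cardnum := if c = 'J' then cardnum ++ [11] else cardnum
    let cardnum := if c = 'Q' then cardnum ++ [12] else cardnum
    let cardnum := if c = 'K' then cardnum ++ [13] else cardnum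
    let cardnum := if c = 'A' then cardnum ++ [14] else cardnum
    cardnum

def getnums (cards : List String) : List Int :=
  PySem.List.sorted (cards.foldl getnumsBody []) (fun x => x) false

-- loop body of samenum's for-loop, on the state (num, ans, cnt)
def samenumBody (st : Int × List Int × Int) (card : Int) : Int × List Int × Int :=
  if card = st.1 then (st.1, st.2.1, st.2.2 + 1) else (card, st.2.1 ++ [st.2.2], 1)

def samenum (cards : List String) : List Int :=
  match PySem.List.pyGet? (getnums cards) 0 with
  | none => []           -- cards[0]: IndexError in Python; outside Pre_samenum
  | some num =>
    -- fold = final loop state (num, ans, cnt); return sorted(ans + [cnt])[::-1]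
    -- (xs[::-1] is xs.reverse, PySem.List.slice?_none_none_neg_one)
    (PySem.List.sorted (((getnums cards).foldl samenumBody (num, [], 0)).2.1
      ++ [((getnums cards).foldl samenumBody (num, [], 0)).2.2]) (fun x => x) false).reverse

-- ===== PORT B =====
def rankDict : PySem.Dict Char Int :=
  PySem.Dict.ofList [('2', 2), ('3', 3), ('4', 4), ('5', 5), ('6', 6), ('7', 7), ('8', 8),
                     ('9', 9), ('T', 10), ('J', 11), ('Q', 12), ('K', 13), ('A', 14)]

-- loop body of B: r = _RANK.get(card[0]); if r is not None: counts[r] = counts.get(r, 0) + 1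
def samenumAltBody (counts : PySem.Dict Int Int) (card : String) : PySem.Dict Int Int :=
  match PySem.Str.pyGet? card 0 with
  | none => counts       -- card[0]: IndexError in Python; outside Pre_samenum
  | some c =>
    match rankDict.get? c with
    | none => counts
    | some r => counts.insert r (counts.getD r 0 + 1)

def samenum_alt (cards : List String) : List Int :=
  PySem.List.sorted (cards.foldl samenumAltBody PySem.Dict.empty).values (fun x => x) true

-- ===== PRECONDITION & SPEC =====
def rankChars : List Char := ['2', '3', '4', '5', '6', '7', '8', '9', 'T', 'J', 'Q', 'K', 'A']

-- Pre_ excludes exactly the inputs where A raises IndexError: a hand containing an empty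
-- card string (card[0] in getnums), or a hand in which no card starts with a rank character
-- (then getnums returns [] and cards[0] raises).
def Pre_samenum (cards : List String) : Prop :=
  cards.all (fun card => !card.toList.isEmpty) = true ∧
  cards.any (fun card => rankChars.any (fun c => card.toList.head? == some c)) = true
instance (cards : List String) : Decidable (Pre_samenum cards) := by unfold Pre_samenum; infer_instance

def pvWitness_samenum : List String := ["2H", "2D", "AS", "TC", "TD"]

-- On hands whose cards are all nonempty but none starts with a rank character, A raises IndexError
-- (cards[0] on the empty rank list) while B returns [] (no counts to report).
def Raises_samenum (cards : List String) : Prop :=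
  cards.all (fun card => !card.toList.isEmpty) = true ∧
  ¬ cards.any (fun card => rankChars.any (fun c => card.toList.head? == some c)) = true
instance (cards : List String) : Decidable (Raises_samenum cards) := by unfold Raises_samenum; infer_instance

def pvRaiseWitness_samenum : List String := ["XY", "zz"]
def pvRaiseWitnessOut_samenum : List Int := []

def Spec_samenum (cards : List String) (out : List Int) : Prop := out = samenum_alt cards
instance (cards : List String) (out : List Int) : Decidable (Spec_samenum cards out) := by unfold Spec_samenum; infer_instance

-- ===== CLAIM (what is proved, stated in full; the proofs are below) =====
def Claim_equal_samenum : Prop := ∀ (cards : List String), Dom_samenum cards → Pre_samenum cards → Spec_samenum cards (samenum cards)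
def Claim_raises_samenum : Prop := (∀ (cards : List String), Dom_samenum cards → Raises_samenum cards → ¬ Pre_samenum cards) ∧ (Dom_samenum (pvRaiseWitness_samenum) ∧ Raises_samenum (pvRaiseWitness_samenum) ∧ samenum_alt (pvRaiseWitness_samenum) = pvRaiseWitnessOut_samenum)

-- ===== LEMMAS AND PROOFS =====

-- the rank of one card, and the rank list of a hand (in hand order)
def rkOpt (card : String) : Option Int := (PySem.Str.pyGet? card 0).bind rankDict.get?
def ranksOf (cards : List String) : List Int := cards.flatMap (fun card => (rkOpt card).toList)

lemma listGet0 {α : Type} (h : α) (t : List α) : PySem.List.pyGet? (h :: t) 0 = some h := by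
  simp [PySem.List.pyGet?, PySem.List.pyIdx?]

lemma strGet0 (s : String) (c : Char) (cs : List Char) (h : s.toList = c :: cs) :
    PySem.Str.pyGet? s 0 = some c := by
  simp [PySem.Str.pyGet?, PySem.List.pyGet?, PySem.List.pyIdx?, h]

lemma getnumsBody_eq (acc : List Int) (card : String) :
    getnumsBody acc card = acc ++ (rkOpt card).toList := by
  unfold getnumsBody rkOpt
  cases h : PySem.Str.pyGet? card 0 with
  | none => simp
  | some c =>
    by_cases h2 : c = '2'; · subst h2; rfl
    by_cases h3 : c = '3'; · subst h3; rfl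
    by_cases h4 : c = '4'; · subst h4; rfl
    by_cases h5 : c = '5'; · subst h5; rfl
    by_cases h6 : c = '6'; · subst h6; rfl
    by_cases h7 : c = '7'; · subst h7; rfl
    by_cases h8 : c = '8'; · subst h8; rfl
    by_cases h9 : c = '9'; · subst h9; rfl
    by_cases hT : c = 'T'; · subst hT; rfl
    by_cases hJ : c = 'J'; · subst hJ; rfl
    by_cases hQ : c = 'Q'; · subst hQ; rfl
    by_cases hK : c = 'K'; · subst hK; rfl
    by_cases hA : c = 'A'; · subst hA; rfl
    have hget : rankDict.get? c = none := by
      have hd : rankDict = PySem.Dict.mk [('2', 2), ('3', 3), ('4', 4), ('5', 5), ('6', 6),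
        ('7', 7), ('8', 8), ('9', 9), ('T', 10), ('J', 11), ('Q', 12), ('K', 13), ('A', 14)] := rfl
      rw [hd]
      simp only [PySem.Dict.get?_mk_cons, beq_iff_eq]
      simp [Ne.symm h2, Ne.symm h3, Ne.symm h4,
        Ne.symm h5, Ne.symm h6, Ne.symm h7, Ne.symm h8, Ne.symm h9, Ne.symm hT,
        Ne.symm hJ, Ne.symm hQ, Ne.symm hK, Ne.symm hA]
      rfl
    simp [h2, h3, h4, h5, h6, h7, h8, h9, hT, hJ, hQ, hK, hA, hget]

lemma foldl_getnumsBody (cards : List String) :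
    ∀ acc : List Int, cards.foldl getnumsBody acc = acc ++ ranksOf cards := by
  induction cards with
  | nil => intro acc; simp [ranksOf]
  | cons card rest ih =>
    intro acc
    simp only [List.foldl_cons, getnumsBody_eq, ranksOf, List.flatMap_cons]
    rw [ih]
    simp [ranksOf]

lemma getnums_eq (cards : List String) :
    getnums cards = PySem.List.sorted (ranksOf cards) (fun x => x) false := by
  unfold getnums
  rw [foldl_getnumsBody]
  simp

lemma foldl_altBody (cards : List String) :
    ∀ d : PySem.Dict Int Int, cards.foldl samenumAltBody d
      = (ranksOf cards).foldl (fun d x => d.insert x (d.getD x 0 + 1)) d := by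
  induction cards with
  | nil => intro d; simp [ranksOf]
  | cons card rest ih =>
    intro d
    have hstep : samenumAltBody d card
        = (rkOpt card).toList.foldl (fun d x => d.insert x (d.getD x 0 + 1)) d := by
      unfold samenumAltBody rkOpt
      cases hg : PySem.Str.pyGet? card 0 with
      | none => simp
      | some c =>
        cases hr : rankDict.get? c with
        | none => simp [hr]
        | some r => simp [hr]
    simp only [List.foldl_cons, ranksOf, List.flatMap_cons]
    rw [ih, hstep, List.foldl_append]
    simp [ranksOf]

lemma samenum_alt_eq (cards : List String) :
    samenum_alt cards
      = PySem.List.sorted ((PySem.Set.ofList (ranksOf cards)).map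
          (fun k => ((ranksOf cards).count k : Int))) (fun x => x) true := by
  unfold samenum_alt
  rw [foldl_altBody, PySem.Dict.foldl_insert_getD_add_one_eq_counter]
  simp only [PySem.Dict.values, PySem.Dict.items_counter, List.map_map]
  rfl

lemma foldl_add_eq (l : List Int) :
    ∀ s : List Int, l.foldl PySem.Set.add s
      = s ++ (PySem.Set.ofList l).filter (fun z => decide (z ∉ s)) := by
  induction l with
  | nil => intro s; simp [PySem.Set.ofList, PySem.Set.empty]
  | cons x l ih =>
    intro s
    have hofl : PySem.Set.ofList (x :: l)
        = [x] ++ (PySem.Set.ofList l).filter (fun z => decide (z ∉ ([x] : List Int))) := by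
      show List.foldl PySem.Set.add PySem.Set.empty (x :: l) = _
      simp only [List.foldl_cons]
      have hadd : PySem.Set.add PySem.Set.empty x = [x] := rfl
      rw [hadd, ih]
    simp only [List.foldl_cons]
    by_cases hx : x ∈ s
    · have hadd : PySem.Set.add s x = s := by
        simp [PySem.Set.add, PySem.Set.contains, hx]
      rw [hadd, ih, hofl]
      simp only [List.filter_append, List.filter_filter]
      congr 1
      have h1 : List.filter (fun z => decide (z ∉ s)) [x] = [] := by simp [hx]
      rw [h1, List.nil_append]
      apply List.filter_congr
      intro a _
      by_cases ha : a ∈ s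
      · simp [ha]
      · simp [ha, show a ≠ x from fun he => ha (he ▸ hx)]
    · have hadd : PySem.Set.add s x = s ++ [x] := by
        simp [PySem.Set.add, PySem.Set.contains, hx]
      rw [hadd, ih, hofl]
      simp only [List.filter_append, List.filter_filter, List.append_assoc]
      congr 1
      have h1 : List.filter (fun z => decide (z ∉ s)) [x] = [x] := by simp [hx]
      rw [h1]
      congr 1
      apply List.filter_congr
      intro a _
      by_cases h1 : a ∈ s
      · simp [List.mem_append, h1]
      · by_cases h2 : a ∈ ([x] : List Int)
        · simp [List.mem_append, h1, h2]
        · simp [List.mem_append, h1, h2]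

lemma ofList_cons (a : Int) (l : List Int) :
    PySem.Set.ofList (a :: l) = a :: (PySem.Set.ofList l).filter (fun z => decide (z ≠ a)) := by
  have h0 : PySem.Set.ofList (a :: l) = List.foldl PySem.Set.add PySem.Set.empty (a :: l) := rfl
  rw [h0]
  simp only [List.foldl_cons]
  have hadd : PySem.Set.add PySem.Set.empty a = [a] := rfl
  rw [hadd, foldl_add_eq]
  simp

-- the run-length loop on a sorted tail
lemma rle_loop (t : List Int) :
    ∀ (num cnt : Int) (ans : List Int), t.Pairwise (· ≤ ·) → (∀ x ∈ t, num ≤ x) →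
      ((t.foldl samenumBody (num, ans, cnt)).2.1 ++ [(t.foldl samenumBody (num, ans, cnt)).2.2])
        = ans ++ (cnt + (t.count num : Int))
            :: ((PySem.Set.ofList t).filter (fun z => decide (z ≠ num))).map (fun k => ((t.count k : Int))) := by
  induction t with
  | nil => intro num cnt ans _ _; simp [PySem.Set.ofList, PySem.Set.empty]
  | cons a t ih =>
    intro num cnt ans hpw hge
    have hpt : t.Pairwise (· ≤ ·) := (List.pairwise_cons.mp hpw).2
    have hat : ∀ x ∈ t, a ≤ x := (List.pairwise_cons.mp hpw).1
    have hna : num ≤ a := hge a List.mem_cons_self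
    simp only [List.foldl_cons, samenumBody]
    by_cases hcase : a = num
    · subst hcase
      rw [if_pos rfl]
      rw [ih a (cnt + 1) ans hpt hat]
      rw [ofList_cons]
      have htail : ((a :: (PySem.Set.ofList t).filter (fun z => decide (z ≠ a))).filter
            (fun z => decide (z ≠ a))).map (fun k => (((a :: t).count k : Int)))
          = ((PySem.Set.ofList t).filter (fun z => decide (z ≠ a))).map
            (fun k => ((t.count k : Int))) := by
        have hda : (decide (a ≠ a)) = false := by simp
        rw [List.filter_cons, hda]
        simp only [Bool.false_eq_true, if_false, List.filter_filter, Bool.and_self]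
        apply List.map_congr_left
        intro k hk
        rw [List.count_cons_of_ne (Ne.symm (by simpa using (List.mem_filter.mp hk).2))]
      rw [htail]
      congr 2
      simp only [List.count_cons_self]
      push_cast
      ring
    · rw [if_neg (by simpa using hcase)]
      rw [ih a 1 (ans ++ [cnt]) hpt hat]
      have hlt : ∀ x ∈ a :: t, num < x := by
        intro x hx
        rcases List.mem_cons.mp hx with rfl | hx'
        · exact lt_of_le_of_ne hna (fun he => hcase he.symm)
        · exact lt_of_lt_of_le (lt_of_le_of_ne hna (fun he => hcase he.symm)) (hat x hx')
      have hnm : num ∉ a :: t := fun hm => lt_irrefl num (hlt num hm)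
      have hc0 : (a :: t).count num = 0 := List.count_eq_zero.mpr hnm
      rw [hc0, ofList_cons]
      have hda : (decide (a ≠ num)) = true := by simp [hcase]
      rw [List.filter_cons, hda]
      simp only [if_true, List.filter_filter]
      have hff : List.filter (fun z => decide (z ≠ num) && decide (z ≠ a)) (PySem.Set.ofList t)
          = List.filter (fun z => decide (z ≠ a)) (PySem.Set.ofList t) := by
        apply List.filter_congr
        intro z hz
        have hzm : z ∈ t := (PySem.Set.mem_ofList t z).mp hz
        have hzn : z ≠ num := ne_of_gt (hlt z (List.mem_cons_of_mem a hzm))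
        simp [hzn]
      rw [hff]
      simp only [List.map_cons, List.count_cons_self]
      have hmap : ((PySem.Set.ofList t).filter (fun z => decide (z ≠ a))).map
            (fun k => (((a :: t).count k : Int)))
          = ((PySem.Set.ofList t).filter (fun z => decide (z ≠ a))).map
            (fun k => ((t.count k : Int))) := by
        apply List.map_congr_left
        intro k hk
        rw [List.count_cons_of_ne (Ne.symm (by simpa using (List.mem_filter.mp hk).2))]
      rw [hmap]
      push_cast
      simp only [List.append_assoc, List.singleton_append]
      congr 2
      · ring
      · congr 1
        ring

lemma rev_sorted_eq (xs ys : List Int) (h : xs.Perm ys) :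
    (PySem.List.sorted xs (fun x => x) false).reverse = PySem.List.sorted ys (fun x => x) true := by
  apply List.Perm.eq_of_pairwise (le := fun a b : Int => b ≤ a)
  · intro a b _ _ h1 h2; omega
  · rw [List.pairwise_reverse]
    exact PySem.List.sorted_pairwise xs (fun x => x)
  · exact PySem.List.sorted_pairwise_rev ys (fun x => x)
  · exact ((PySem.List.sorted xs (fun x => x) false).reverse_perm.trans
      (PySem.List.sorted_perm xs (fun x => x) false)).trans
      (h.trans (PySem.List.sorted_perm ys (fun x => x) true).symm)

lemma ranksOf_ne_nil (cards : List String) (h : Pre_samenum cards) : ranksOf cards ≠ [] := by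
  obtain ⟨_, hex⟩ := h
  rw [List.any_eq_true] at hex
  obtain ⟨card, hcard, hc⟩ := hex
  rw [List.any_eq_true] at hc
  obtain ⟨c, hcrk, hh⟩ := hc
  have hhead : card.toList.head? = some c := by simpa using hh
  obtain ⟨cs, hcs⟩ : ∃ cs, card.toList = c :: cs := by
    cases hh : card.toList with
    | nil => rw [hh] at hhead; simp at hhead
    | cons d ds => rw [hh] at hhead; simp at hhead; exact ⟨ds, by rw [hhead]⟩
  obtain ⟨v, hv⟩ : ∃ v, rankDict.get? c = some v := by
    fin_cases hcrk <;> exact ⟨_, rfl⟩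
  have hrk : rkOpt card = some v := by
    unfold rkOpt
    rw [strGet0 card c cs hcs]
    exact hv
  have hmem : v ∈ ranksOf cards := List.mem_flatMap.mpr ⟨card, hcard, by simp [hrk]⟩
  exact List.ne_nil_of_mem hmem

-- ===== VERDICT (by name: the statement is the Claim_ definition above) =====
theorem samenum_spec : Claim_equal_samenum := by
  intro cards _ hpre
  show samenum cards = samenum_alt cards
  have hR : ranksOf cards ≠ [] := ranksOf_ne_nil cards hpre
  obtain ⟨h, t, hst⟩ : ∃ h t, PySem.List.sorted (ranksOf cards) (fun x => x) false = h :: t := by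
    cases hsrt : PySem.List.sorted (ranksOf cards) (fun x => x) false with
    | nil => exact absurd ((PySem.List.sorted_eq_nil_iff _ _ _).mp hsrt) hR
    | cons a b => exact ⟨a, b, rfl⟩
  have hgn : getnums cards = h :: t := (getnums_eq cards).trans hst
  have hpw : (h :: t).Pairwise (· ≤ ·) := by
    have hp := PySem.List.sorted_pairwise (ranksOf cards) (fun x => x)
    rw [hst] at hp; exact hp
  have hAstep : samenum cards
      = (PySem.List.sorted ((((h :: t).foldl samenumBody (h, [], 0)).2.1)
          ++ [(((h :: t).foldl samenumBody (h, [], 0)).2.2)]) (fun x => x) false).reverse := by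
    unfold samenum
    rw [hgn, listGet0]
  have hb : samenumBody (h, ([] : List Int), (0 : Int)) h = (h, [], 1) := by
    simp [samenumBody]
  rw [hAstep, List.foldl_cons, hb,
    rle_loop t h 1 [] (List.pairwise_cons.mp hpw).2 (List.pairwise_cons.mp hpw).1]
  have hLA : ((1 : Int) + (t.count h : Int))
        :: ((PySem.Set.ofList t).filter (fun z => decide (z ≠ h))).map (fun k => ((t.count k : Int)))
      = (PySem.Set.ofList (h :: t)).map (fun k => (((h :: t).count k : Int))) := by
    rw [ofList_cons]
    simp only [List.map_cons, List.count_cons_self]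
    congr 1
    · push_cast; ring
    · apply (List.map_congr_left _).symm
      intro k hk
      rw [List.count_cons_of_ne (Ne.symm (by simpa using (List.mem_filter.mp hk).2))]
  rw [List.nil_append, hLA, samenum_alt_eq]
  apply rev_sorted_eq
  have hperm : (h :: t).Perm (ranksOf cards) := by
    rw [← hst]; exact PySem.List.sorted_perm (ranksOf cards) (fun x => x) false
  have hmapeq : (PySem.Set.ofList (h :: t)).map (fun k => (((h :: t).count k : Int)))
      = (PySem.Set.ofList (h :: t)).map (fun k => (((ranksOf cards).count k : Int))) := by
    apply List.map_congr_left
    intro k _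
    rw [hperm.count_eq]
  rw [hmapeq]
  apply List.Perm.map
  rw [List.perm_ext_iff_of_nodup (PySem.Set.nodup_ofList _) (PySem.Set.nodup_ofList _)]
  intro a
  rw [PySem.Set.mem_ofList, PySem.Set.mem_ofList]
  exact hperm.mem_iff

theorem samenum_raises : Claim_raises_samenum := by
  unfold Claim_raises_samenum
  exact ⟨fun cards _ hr hp => hr.2 hp.2, by decide, ⟨by rfl, by decide⟩, by rfl⟩

-- witness self-check: the Raises_ witness lies inside the region and B's port returns the stated value there
theorem pvRaiseWitness_ok :
    Raises_samenum pvRaiseWitness_samenum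
      ∧ samenum_alt pvRaiseWitness_samenum = pvRaiseWitnessOut_samenum :=
  ⟨samenum_raises.2.2.1, samenum_raises.2.2.2⟩
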